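-- pv_equiv track=rewrite | github.com/sheyma/nonlinear_dynamics | clustering_coef.py | path_node
-- ===== SOURCE A (Python) =====
-- def path_node(G,node):
-- 	# finds path lengths of given node to all other nodes
-- 	# returns a dict, keys are other nodes, values distances
-- 	node_paths = {}
-- 	distance   = 0
-- 	temp_nodes = {node:0}
-- 	while len(temp_nodes) != 0:
-- 		new_nodes  = temp_nodes
-- 		temp_nodes = {}
-- 		for v in new_nodes:
-- 			if v not in node_paths:
-- 				node_paths[v] = distance
-- 				temp_nodes.update(G[v])
-- 		distance=distance+1
-- 	return node_paths
-- ===== SOURCE B (Python) =====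
-- from collections import deque
--
--
-- def path_node(G, node):
--     # single-queue BFS: one FIFO of (vertex, distance) pairs replaces the
--     # two level dicts and the per-level distance counter
--     result = {}
--     queue = deque([(node, 0)])
--     while queue:
--         v, d = queue.popleft()
--         if v not in result:
--             result[v] = d
--             queue.extend((w, d + 1) for w in G[v])
--     return result
-- ===== Notes on version B (the rewrite author's own statement) =====
-- stated objective: idiomatic
-- what changed: The two per-level frontier dicts and the external distance counter are replaced by a single FIFO queue of (vertex, distance) pairs consumed one element at a time, collapsing the nested level loops into one loop.
import Mathlib
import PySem

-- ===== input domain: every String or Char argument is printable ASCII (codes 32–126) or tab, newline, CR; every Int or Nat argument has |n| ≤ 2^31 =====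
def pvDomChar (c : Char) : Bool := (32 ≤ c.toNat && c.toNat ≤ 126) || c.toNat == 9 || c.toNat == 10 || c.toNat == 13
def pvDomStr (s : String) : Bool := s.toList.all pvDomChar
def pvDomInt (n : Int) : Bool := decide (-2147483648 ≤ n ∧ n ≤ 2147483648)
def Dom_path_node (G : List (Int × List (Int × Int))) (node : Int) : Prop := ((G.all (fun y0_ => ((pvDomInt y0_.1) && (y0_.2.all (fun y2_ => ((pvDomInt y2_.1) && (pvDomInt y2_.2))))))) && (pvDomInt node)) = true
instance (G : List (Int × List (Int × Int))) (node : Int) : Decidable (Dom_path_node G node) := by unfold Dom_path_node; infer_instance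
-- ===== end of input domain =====

-- B replaces A's two per-level frontier dicts and external distance counter with one FIFO queue of
-- (vertex, distance) pairs — same BFS result, a single loop instead of nested level loops (objective: idiomatic).

-- ===== PORT A =====
-- G[v] (Python dict lookup; none = KeyError, excluded by Pre_)
def pvAdj (G : List (Int × List (Int × Int))) (v : Int) : Option (List (Int × Int)) :=
  (PySem.Dict.mk G).get? v

-- the `for v in new_nodes:` body; iterates the items of the level dict
def pathLevel (G : List (Int × List (Int × Int))) (dist : Int) :
    List (Int × Int) → PySem.Dict Int Int → PySem.Dict Int Int →
    PySem.Dict Int Int × PySem.Dict Int Int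
  | [], paths, temp => (paths, temp)
  | p :: rest, paths, temp =>
    if paths.contains p.1 then pathLevel G dist rest paths temp
    else
      match pvAdj G p.1 with
      | some adj => pathLevel G dist rest (paths.insert p.1 dist) (temp.update adj)
      | none => pathLevel G dist rest (paths.insert p.1 dist) temp
        -- Python raises KeyError here; such inputs are outside Pre_

-- fuel bound for the while-loop (totality only; proved sufficient in the lemmas below)
def pvFuel (G : List (Int × List (Int × Int))) : Nat := (G.map (fun p => p.2.length)).sum + 3

-- the `while len(temp_nodes) != 0:` loop
def pathWhile (G : List (Int × List (Int × Int))) :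
    Nat → PySem.Dict Int Int → PySem.Dict Int Int → Int → PySem.Dict Int Int
  | 0, paths, _, _ => paths
  | fuel + 1, paths, temp, dist =>
    if temp.items.isEmpty then paths
    else
      let pt := pathLevel G dist temp.items paths PySem.Dict.empty
      pathWhile G fuel pt.1 pt.2 (dist + 1)

def path_node (G : List (Int × List (Int × Int))) (node : Int) : List (Int × Int) :=
  (pathWhile G (pvFuel G) PySem.Dict.empty (PySem.Dict.empty.insert node 0) 0).items

-- ===== PORT B =====
-- the `while queue:` loop: pop (v, d) from the left, assign if new, push neighbours at d+1
def pathBFS (G : List (Int × List (Int × Int))) :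
    Nat → PySem.Dict Int Int → List (Int × Int) → PySem.Dict Int Int
  | 0, res, _ => res
  | _ + 1, res, [] => res
  | fuel + 1, res, q :: rest =>
    if res.contains q.1 then pathBFS G fuel res rest
    else
      match pvAdj G q.1 with
      | some adj => pathBFS G fuel (res.insert q.1 q.2) (rest ++ adj.map (fun p => (p.1, q.2 + 1)))
      | none => pathBFS G fuel (res.insert q.1 q.2) rest
        -- Python raises KeyError here; such inputs are outside Pre_

def path_node_alt (G : List (Int × List (Int × Int))) (node : Int) : List (Int × Int) :=
  (pathBFS G (pvFuel G) PySem.Dict.empty [(node, 0)]).items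

-- ===== PRECONDITION & SPEC =====
-- one neighbourhood-expansion step of a set of vertices (vertices that are not keys contribute nothing)
def pvStep (G : List (Int × List (Int × Int))) (s : List Int) : List Int :=
  PySem.Set.update s (s.flatMap (fun v => ((pvAdj G v).getD []).map (fun p => p.1)))

-- closure of {node} under pvStep (|G|+1 iterations reach the fixpoint: ≤ |G| keys can ever be added)
def pvReach (G : List (Int × List (Int × Int))) (node : Int) : List Int :=
  (pvStep G)^[G.length + 1] (PySem.Set.ofList [node])

-- Pre_: every vertex reachable from node (including node itself) is a key of G —
-- exactly the inputs on which every dict lookup G[v] made by A (and by B) succeeds,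
-- i.e. on which the Python A returns instead of raising KeyError.
def Pre_path_node (G : List (Int × List (Int × Int))) (node : Int) : Prop :=
  ∀ v ∈ pvReach G node, v ∈ G.map (fun p => p.1)
instance (G : List (Int × List (Int × Int))) (node : Int) : Decidable (Pre_path_node G node) := by
  unfold Pre_path_node; infer_instance

def pvWitness_path_node : (List (Int × List (Int × Int))) × Int :=
  ([(0, [(1, 1)]), (1, [])], 0)

def Spec_path_node (G : List (Int × List (Int × Int))) (node : Int) (out : List (Int × Int)) : Prop := out = path_node_alt G node
instance (G : List (Int × List (Int × Int))) (node : Int) (out : List (Int × Int)) : Decidable (Spec_path_node G node out) := by unfold Spec_path_node; infer_instance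

-- ===== CLAIM (what is proved, stated in full; the proofs are below) =====
def Claim_equal_path_node : Prop := ∀ (G : List (Int × List (Int × Int))) (node : Int), Dom_path_node G node → Pre_path_node G node → Spec_path_node G node (path_node G node)

-- ===== LEMMAS AND PROOFS =====

-- reference level processor: consumes a raw stream of keys, returns the updated result dict and
-- the (duplicate-carrying) stream of neighbour keys pushed for the next level
def refL (G : List (Int × List (Int × Int))) (d : Int) :
    List Int → PySem.Dict Int Int → PySem.Dict Int Int × List Int
  | [], res => (res, [])
  | v :: vs, res =>
    if res.contains v then refL G d vs res
    else
      match pvAdj G v with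
      | some adj =>
        let rs := refL G d vs (res.insert v d)
        (rs.1, adj.map (fun p => p.1) ++ rs.2)
      | none => refL G d vs (res.insert v d)

-- level-by-level model both ports are reduced to
def modelLoop (G : List (Int × List (Int × Int))) :
    Nat → PySem.Dict Int Int → List Int → Int → PySem.Dict Int Int
  | 0, res, _, _ => res
  | f + 1, res, stream, d =>
    if stream.isEmpty then res
    else modelLoop G f (refL G d stream res).1 (refL G d stream res).2 (d + 1)

-- potential: total adjacency-list length over keys not yet assigned
def msum (G : List (Int × List (Int × Int))) (res : PySem.Dict Int Int) : Nat :=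
  ((G.filter (fun p => !res.contains p.1)).map (fun p => p.2.length)).sum

lemma refL_discard (G : List (Int × List (Int × Int))) (d v : Int) :
    ∀ (t : List Int) (res : PySem.Dict Int Int), res.contains v = true →
      refL G d (PySem.Set.discard t v) res = refL G d t res := by
  intro t
  induction t with
  | nil => intro res h; rfl
  | cons w ws ih =>
    intro res h
    by_cases hwv : w = v
    · subst hwv
      simp [PySem.Set.discard, refL, h]
      have : PySem.Set.discard ws w = List.filter (fun y => !y == w) ws := rfl
      rw [← this, ih res h]
    · have hne : (w == v) = false := by simp [hwv]
      simp only [PySem.Set.discard, List.filter_cons, hne]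
      show refL G d (w :: PySem.Set.discard ws v) res = refL G d (w :: ws) res
      simp only [refL]
      by_cases hw : res.contains w
      · simp only [hw, if_true]; exact ih res h
      · simp only [Bool.not_eq_true] at hw
        simp only [hw]
        cases hadj : pvAdj G w with
        | some adj =>
          have hv' : (res.insert w d).contains v = true := by
            rw [PySem.Dict.contains_insert]; simp [h]
          simp [ih _ hv']
        | none =>
          have hv' : (res.insert w d).contains v = true := by
            rw [PySem.Dict.contains_insert]; simp [h]
          simp [ih _ hv']

lemma refL_ofList (G : List (Int × List (Int × Int))) (d : Int) :
    ∀ (s : List Int) (res : PySem.Dict Int Int),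
      refL G d (PySem.Set.ofList s) res = refL G d s res := by
  intro s
  induction s with
  | nil => intro res; rfl
  | cons v vs ih =>
    intro res
    rw [PySem.Set.ofList_cons]
    show refL G d (v :: (PySem.Set.ofList vs).discard v) res = refL G d (v :: vs) res
    simp only [refL]
    by_cases hv : res.contains v
    · simp only [hv, if_true]
      rw [refL_discard G d v _ res hv, ih res]
    · simp only [Bool.not_eq_true] at hv
      simp only [hv]
      have hv' : (res.insert v d).contains v = true := by
        rw [PySem.Dict.contains_insert]; simp
      cases hadj : pvAdj G v with
      | some adj => simp [refL_discard G d v _ _ hv', ih]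
      | none => simp [refL_discard G d v _ _ hv', ih]

lemma modelLoop_ofList (G : List (Int × List (Int × Int))) (f : Nat)
    (res : PySem.Dict Int Int) (s : List Int) (d : Int) :
    modelLoop G f res (PySem.Set.ofList s) d = modelLoop G f res s d := by
  cases f with
  | zero => rfl
  | succ f =>
    cases s with
    | nil => rfl
    | cons v vs =>
      rw [PySem.Set.ofList_cons]
      show modelLoop G (f + 1) res (v :: (PySem.Set.ofList vs).discard v) d
          = modelLoop G (f + 1) res (v :: vs) d
      simp only [modelLoop, List.isEmpty_cons, Bool.false_eq_true, if_false]
      have h := refL_ofList G d (v :: vs) res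
      rw [PySem.Set.ofList_cons] at h
      rw [h]

lemma dict_update_keys (t : PySem.Dict Int Int) (adj : List (Int × Int)) :
    (t.update adj).keys = PySem.Set.update t.keys (adj.map (fun p => p.1)) := by
  show (List.foldl (fun acc p => acc.insert p.1 p.2) t adj).keys = _
  exact PySem.Dict.keys_foldl_insert_key adj (fun p => p.1) (fun _ p => p.2) t

lemma pathLevel_spec (G : List (Int × List (Int × Int))) (dist : Int) :
    ∀ (items : List (Int × Int)) (paths temp : PySem.Dict Int Int),
      (pathLevel G dist items paths temp).1
          = (refL G dist (items.map (fun p => p.1)) paths).1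
      ∧ (pathLevel G dist items paths temp).2.keys
          = PySem.Set.update temp.keys (refL G dist (items.map (fun p => p.1)) paths).2 := by
  intro items
  induction items with
  | nil => intro paths temp; exact ⟨rfl, rfl⟩
  | cons p rest ih =>
    intro paths temp
    by_cases hc : paths.contains p.1
    · simp only [pathLevel, List.map_cons, refL, hc, if_true]; exact ih paths temp
    · simp only [Bool.not_eq_true] at hc
      cases hadj : pvAdj G p.1 with
      | some adj =>
        simp only [pathLevel, List.map_cons, refL, hc, hadj, Bool.false_eq_true, if_false]
        refine ⟨(ih _ _).1, ?_⟩
        rw [(ih _ _).2, dict_update_keys, PySem.Set.update_append]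
      | none =>
        simp only [pathLevel, List.map_cons, refL, hc, hadj, Bool.false_eq_true, if_false]
        exact ih _ _

lemma pathWhile_eq (G : List (Int × List (Int × Int))) :
    ∀ (f : Nat) (paths temp : PySem.Dict Int Int) (d : Int),
      pathWhile G f paths temp d = modelLoop G f paths temp.keys d := by
  intro f
  induction f with
  | zero => intro paths temp d; rfl
  | succ f ih =>
    intro paths temp d
    have hkeys : temp.keys.isEmpty = temp.items.isEmpty := by
      show (temp.items.map (fun p => p.1)).isEmpty = temp.items.isEmpty
      cases temp.items <;> rfl
    simp only [pathWhile, modelLoop, hkeys]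
    by_cases he : temp.items.isEmpty
    · simp [he]
    · simp only [he]
      have hs := pathLevel_spec G d temp.items paths PySem.Dict.empty
      rw [ih, hs.1, hs.2]
      have : PySem.Set.update (PySem.Dict.empty : PySem.Dict Int Int).keys
          (refL G d (temp.items.map (fun p => p.1)) paths).2
          = PySem.Set.ofList (refL G d (temp.items.map (fun p => p.1)) paths).2 := rfl
      rw [this]
      show modelLoop G f _ _ _ = _
      rw [modelLoop_ofList]
      rfl

lemma bfs_nilq (G : List (Int × List (Int × Int))) (fuel : Nat) (res : PySem.Dict Int Int) :
    pathBFS G fuel res [] = res := by cases fuel <;> rfl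

lemma bfs_level (G : List (Int × List (Int × Int))) (d : Int) :
    ∀ (stream : List Int) (fuel : Nat) (res : PySem.Dict Int Int) (acc : List Int),
      pathBFS G (fuel + stream.length) res
          (stream.map (fun v => (v, d)) ++ acc.map (fun v => (v, d + 1)))
        = pathBFS G fuel (refL G d stream res).1
            ((acc ++ (refL G d stream res).2).map (fun v => (v, d + 1))) := by
  intro stream
  induction stream with
  | nil => intro fuel res acc; simp [refL]
  | cons v vs ih =>
    intro fuel res acc
    simp only [List.map_cons, List.cons_append, List.length_cons]
    have : fuel + (vs.length + 1) = (fuel + vs.length) + 1 := by omega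
    rw [this]
    simp only [pathBFS, refL]
    by_cases hc : res.contains v
    · simp only [hc, if_true]; exact ih fuel res acc
    · simp only [Bool.not_eq_true] at hc
      simp only [hc]
      cases hadj : pvAdj G v with
      | some adj =>
        simp only []
        have hmm : adj.map (fun p => (p.1, d + 1)) = (adj.map (fun p => p.1)).map (fun v => (v, d + 1)) := by
          simp [List.map_map]
        rw [hmm, List.append_assoc, ← List.map_append]
        rw [ih fuel (res.insert v d) (acc ++ adj.map (fun p => p.1))]
        simp [List.append_assoc]
      | none =>
        exact ih fuel (res.insert v d) acc

lemma msum_cons (p : Int × List (Int × Int)) (rest : List (Int × List (Int × Int)))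
    (res : PySem.Dict Int Int) :
    msum (p :: rest) res = (if res.contains p.1 = true then 0 else p.2.length) + msum rest res := by
  simp only [msum, List.filter_cons]
  by_cases h : res.contains p.1 <;> simp [h]

lemma msum_mono (res : PySem.Dict Int Int) (v w : Int) :
    ∀ (G : List (Int × List (Int × Int))), msum G (res.insert v w) ≤ msum G res := by
  intro G
  induction G with
  | nil => simp [msum]
  | cons p rest ih =>
    rw [msum_cons, msum_cons]
    have hci : (res.insert v w).contains p.1 = (p.1 == v || res.contains p.1) :=
      PySem.Dict.contains_insert res v p.1 w
    by_cases hp : res.contains p.1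
    · have : (res.insert v w).contains p.1 = true := by rw [hci]; simp [hp]
      simp only [hp, this, if_true]
      omega
    · simp only [Bool.not_eq_true] at hp
      by_cases hq : (res.insert v w).contains p.1
      · simp only [hp, hq, Bool.false_eq_true, if_true, if_false]
        omega
      · simp only [Bool.not_eq_true] at hq
        simp only [hp, hq, Bool.false_eq_true, if_false]
        omega

lemma msum_insert (v w : Int) :
    ∀ (G : List (Int × List (Int × Int))) (res : PySem.Dict Int Int) (adj : List (Int × Int)),
      pvAdj G v = some adj → res.contains v = false →
      adj.length + msum G (res.insert v w) ≤ msum G res := by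
  intro G
  induction G with
  | nil => intro res adj h; simp [pvAdj, PySem.Dict.get?] at h
  | cons p rest ih =>
    intro res adj hadj hc
    have hget : (PySem.Dict.mk (p :: rest)).get? v
        = if (p.1 == v) = true then some p.2 else (PySem.Dict.mk rest).get? v := by
      cases p; exact PySem.Dict.get?_mk_cons _ _ _ _
    simp only [pvAdj] at hadj
    rw [hget] at hadj
    have hci : (res.insert v w).contains p.1 = (p.1 == v || res.contains p.1) :=
      PySem.Dict.contains_insert res v p.1 w
    rw [msum_cons, msum_cons]
    by_cases hpv : (p.1 == v) = true
    · simp only [hpv, if_true, Option.some.injEq] at hadj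
      subst hadj
      have hp1 : p.1 = v := by simpa using hpv
      have hresp : res.contains p.1 = false := by rw [hp1]; exact hc
      have hinsp : (res.insert v w).contains p.1 = true := by rw [hci]; simp [hpv]
      simp only [hresp, hinsp, if_true, Bool.false_eq_true, if_false]
      have := msum_mono res v w rest
      omega
    · simp only [hpv] at hadj
      have hrest := ih res adj hadj hc
      have hsame : (res.insert v w).contains p.1 = res.contains p.1 := by
        rw [hci]; simp [hpv]
      rw [hsame]
      by_cases hp : res.contains p.1 <;> simp only [hp, Bool.false_eq_true, if_true, if_false] <;> omega

lemma refL_phi (G : List (Int × List (Int × Int))) (d : Int) :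
    ∀ (stream : List Int) (res : PySem.Dict Int Int),
      (refL G d stream res).2.length + msum G (refL G d stream res).1 ≤ msum G res := by
  intro stream
  induction stream with
  | nil => intro res; simp [refL]
  | cons v vs ih =>
    intro res
    by_cases hc : res.contains v
    · simp only [refL, hc, if_true]; exact ih res
    · simp only [Bool.not_eq_true] at hc
      cases hadj : pvAdj G v with
      | some adj =>
        simp only [refL, hc, hadj, Bool.false_eq_true, if_false, List.length_append,
          List.length_map]
        have h1 := ih (res.insert v d)
        have h2 := msum_insert v d G res adj hadj hc
        omega
      | none =>
        simp only [refL, hc, hadj, Bool.false_eq_true, if_false]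
        have h1 := ih (res.insert v d)
        have h2 := msum_mono res v d G
        omega

lemma model_eq_bfs (G : List (Int × List (Int × Int))) :
    ∀ (fA : Nat) (fB : Nat) (res : PySem.Dict Int Int) (stream : List Int) (d : Int),
      stream.length + msum G res ≤ fA → stream.length + msum G res ≤ fB →
      modelLoop G fA res stream d = pathBFS G fB res (stream.map (fun v => (v, d))) := by
  intro fA
  induction fA with
  | zero =>
    intro fB res stream d hA _
    have : stream = [] := by
      cases stream with
      | nil => rfl
      | cons v vs => simp at hA
    subst this
    simp [modelLoop, bfs_nilq]
  | succ fA ih =>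
    intro fB res stream d hA hB
    cases stream with
    | nil => simp [modelLoop, bfs_nilq]
    | cons v vs =>
      simp only [modelLoop, List.isEmpty_cons, Bool.false_eq_true, if_false]
      have hlen : (v :: vs).length ≤ fB := by
        have := hB; simp at this ⊢; omega
      have hfB : fB = (fB - (v :: vs).length) + (v :: vs).length := by omega
      rw [hfB]
      have hl := bfs_level G d (v :: vs) (fB - (v :: vs).length) res []
      simp only [List.map_nil, List.nil_append, List.append_nil] at hl
      rw [hl]
      have hphi := refL_phi G d (v :: vs) res
      apply ih
      · have : (v :: vs).length ≥ 1 := by simp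
        simp only [List.length_cons] at hA this ⊢
        omega
      · simp only [List.length_cons] at hB ⊢
        omega

lemma msum_empty (G : List (Int × List (Int × Int))) :
    msum G PySem.Dict.empty = (G.map (fun p => p.2.length)).sum := by
  simp [msum, PySem.Dict.contains_empty]

-- ===== VERDICT (by name: the statement is the Claim_ definition above) =====
theorem path_node_spec : Claim_equal_path_node := by
  intro G node _ _
  show path_node G node = path_node_alt G node
  unfold path_node path_node_alt
  rw [pathWhile_eq]
  have hkeys : (PySem.Dict.empty.insert node (0 : Int)).keys = [node] := rfl
  rw [hkeys]
  have h1 : (1 : Nat) + msum G PySem.Dict.empty ≤ pvFuel G := by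
    rw [msum_empty]; unfold pvFuel; omega
  have := model_eq_bfs G (pvFuel G) (pvFuel G) PySem.Dict.empty [node] 0 (by simpa using h1) (by simpa using h1)
  rw [this]
  rfl
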